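-- pv_equiv track=rewrite | github.com/bassant2005/AI-assignment | Main_logic.py | get_piece_moves
-- ===== SOURCE A (Python) =====
-- EMPTY = '.'
--
-- KING = 'K'
--
-- DEFENDER = 'D'
--
-- ATTACKER = 'A'
--
-- BOARD_SIZE = 11
--
-- CORNERS = [(0,0), (0,10), (10,0), (10,10)]
--
-- THRONE = (BOARD_SIZE // 2, BOARD_SIZE // 2)
--
-- def within_bounds(r, c):
--     return 0 <= r < BOARD_SIZE and 0 <= c < BOARD_SIZE
--
-- def belongs_to(piece, player):
--     if player == ATTACKER:
--         return piece == ATTACKER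
--     return piece in (DEFENDER, KING)   # DEFENDER side owns the King too
--
-- def is_throne(r, c):
--     return (r, c) == THRONE
--
-- def get_piece_moves(board, r, c, player):
--     piece = board[r][c]
--     if not belongs_to(piece, player):
--         return []   # wrong player clicked this piece
--
--     destinations = []
--     directions = [(1,0), (-1,0), (0,1), (0,-1)]
--     for dr, dc in directions:
--         nr, nc = r + dr, c + dc
--         while within_bounds(nr, nc) and board[nr][nc] == EMPTY:
--             if is_valid_move(board, r, c, nr, nc, player):
--                 destinations.append((nr, nc))
--             # Non-king pieces stop sliding at restricted squares
--             if piece != KING and (is_throne(nr, nc) or is_corner(nr, nc)):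
--                 break
--             nr += dr
--             nc += dc
--     return destinations
--
-- def is_valid_move(board, r1, c1, r2, c2, current_player):
--
--     # correct player must own the piece
--     piece = board[r1][c1]
--     if not belongs_to(piece, current_player):
--         return False
--
--     # 1. check if destination is inside board boundaries
--     if not within_bounds(r2, c2):
--         return False
--
--     # 2. ensure movement is straight line only
--     if r1 != r2 and c1 != c2:
--         return False
--
--     # 3. destination must be empty (no overlapping pieces)
--     if board[r2][c2] != EMPTY:
--         return False
--
--     # 4. NO JUMPING: check every square between source and destination
--     #    Determine step direction (+1 or -1) for row and column
--     dr = 0 if r1 == r2 else (1 if r2 > r1 else -1)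
--     dc = 0 if c1 == c2 else (1 if c2 > c1 else -1)
--
--     nr, nc = r1 + dr, c1 + dc
--     while (nr, nc) != (r2, c2):
--         if board[nr][nc] != EMPTY:
--             return False  # piece is blocking the path
--         nr += dr
--         nc += dc
--
--     # only the King may stop on the Throne or a Corner
--     if piece != KING:
--         if is_throne(r2, c2) or is_corner(r2, c2):
--             return False
--
--     return True
--
-- def is_corner(r,c):
--     return (r,c) in CORNERS
-- ===== SOURCE B (Python) =====
-- EMPTY = '.'
-- KING = 'K'
-- DEFENDER = 'D'
-- ATTACKER = 'A'
-- BOARD_SIZE = 11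
-- CORNERS = {(0, 0), (0, 10), (10, 0), (10, 10)}
-- THRONE = (BOARD_SIZE // 2, BOARD_SIZE // 2)
--
--
-- def get_piece_moves(board, r, c, player):
--     piece = board[r][c]
--     if player == ATTACKER:
--         owns = piece == ATTACKER
--     else:
--         owns = piece in (DEFENDER, KING)
--     if not owns:
--         return []   # wrong player clicked this piece
--     king = piece == KING
--
--     def slide(nr, nc, dr, dc):
--         # collect empty squares outward; the slide itself guarantees a clear
--         # straight path, so no per-square path re-scan is needed
--         if not (0 <= nr < BOARD_SIZE and 0 <= nc < BOARD_SIZE):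
--             return []
--         if board[nr][nc] != EMPTY:
--             return []
--         if not king and ((nr, nc) == THRONE or (nr, nc) in CORNERS):
--             return []
--         return [(nr, nc)] + slide(nr + dr, nc + dc, dr, dc)
--
--     return (slide(r + 1, c, 1, 0) + slide(r - 1, c, -1, 0) +
--             slide(r, c + 1, 0, 1) + slide(r, c - 1, 0, -1))
-- ===== Notes on version B (the rewrite author's own statement) =====
-- stated objective: simpler
-- what changed: B drops the per-candidate is_valid_move path re-scan: one recursive slide per direction appends each reached empty square directly, guarded only by the non-king throne/corner stop, turning A's nested O(L^2)-per-direction scan into a single O(L) pass.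
-- outside the precondition, e.g. on get_piece_moves([['A', 'x'], ['x', 'x']], 0, 0, 'A'): A returns [], B returns []; on get_piece_moves([['A', 'x'], ['x', 'x']], -2, 0, 'A'): A returns [], B returns []
import Mathlib
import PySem

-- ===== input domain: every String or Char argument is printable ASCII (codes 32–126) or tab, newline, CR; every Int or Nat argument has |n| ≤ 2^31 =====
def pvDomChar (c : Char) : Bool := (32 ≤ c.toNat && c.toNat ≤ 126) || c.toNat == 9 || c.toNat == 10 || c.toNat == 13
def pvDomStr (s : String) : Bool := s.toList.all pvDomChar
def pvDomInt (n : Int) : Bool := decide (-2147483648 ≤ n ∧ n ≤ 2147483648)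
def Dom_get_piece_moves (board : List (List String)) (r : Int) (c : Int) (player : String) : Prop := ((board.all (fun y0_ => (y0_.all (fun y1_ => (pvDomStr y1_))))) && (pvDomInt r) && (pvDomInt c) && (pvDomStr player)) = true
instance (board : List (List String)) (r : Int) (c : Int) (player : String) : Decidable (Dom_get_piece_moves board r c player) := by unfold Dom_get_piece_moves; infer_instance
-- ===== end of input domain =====

-- B replaces A's per-candidate is_valid_move path re-scan by one direct slide per direction
-- (objective: simpler — same squares collected in a single pass).

-- ===== PORT A =====
-- board[i][j] as Python indexes it (negative wrap; none would be IndexError — excluded by Pre_; getD "" there)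
def pvCell (board : List (List String)) (i j : Int) : String :=
  match PySem.List.pyGet? board i with
  | some row => (PySem.List.pyGet? row j).getD ""
  | none => ""

def pvWithinBounds (r c : Int) : Bool :=
  decide (0 ≤ r ∧ r < 11) && decide (0 ≤ c ∧ c < 11)

def pvBelongsTo (piece player : String) : Bool :=
  if player == "A" then piece == "A" else piece == "D" || piece == "K"

def pvIsThrone (r c : Int) : Bool := r == 5 && c == 5

def pvIsCorner (r c : Int) : Bool :=
  decide ((r, c) ∈ ([(0, 0), (0, 10), (10, 0), (10, 10)] : List (Int × Int)))

-- the "no jumping" while loop of is_valid_move; inside Pre_ every call from the outer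
-- slide reaches its target in ≤ 10 steps, so fuel 24 is never exhausted there
def pvPathLoop (board : List (List String)) (dr dc r2 c2 : Int) : Int → Int → Nat → Bool
  | _, _, 0 => false
  | nr, nc, fuel+1 =>
    if nr == r2 && nc == c2 then true
    else if pvCell board nr nc != "." then false
    else pvPathLoop board dr dc r2 c2 (nr + dr) (nc + dc) fuel

def pv_is_valid_move (board : List (List String)) (r1 c1 r2 c2 : Int) (player : String) : Bool :=
  let piece := pvCell board r1 c1
  if !pvBelongsTo piece player then false
  else if !pvWithinBounds r2 c2 then false
  else if r1 != r2 && c1 != c2 then false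
  else if pvCell board r2 c2 != "." then false
  else
    let dr : Int := if r1 == r2 then 0 else if r2 > r1 then 1 else -1
    let dc : Int := if c1 == c2 then 0 else if c2 > c1 then 1 else -1
    if !pvPathLoop board dr dc r2 c2 (r1 + dr) (c1 + dc) 24 then false
    else if piece != "K" && (pvIsThrone r2 c2 || pvIsCorner r2 c2) then false
    else true

-- the per-direction while loop of A; inside Pre_ it runs ≤ 11 iterations, so fuel 12 suffices
def pvSlideA (board : List (List String)) (r c : Int) (player piece : String)
    (dr dc : Int) : Int → Int → List (Int × Int) → Nat → List (Int × Int)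
  | _, _, acc, 0 => acc
  | nr, nc, acc, fuel+1 =>
    if pvWithinBounds nr nc && (pvCell board nr nc == ".") then
      let acc' := if pv_is_valid_move board r c nr nc player then acc ++ [(nr, nc)] else acc
      if piece != "K" && (pvIsThrone nr nc || pvIsCorner nr nc) then acc'
      else pvSlideA board r c player piece dr dc (nr + dr) (nc + dc) acc' fuel
    else acc

def get_piece_moves (board : List (List String)) (r : Int) (c : Int) (player : String) : List (Int × Int) :=
  let piece := pvCell board r c
  if !pvBelongsTo piece player then []
  else
    let d1 := pvSlideA board r c player piece 1 0 (r + 1) c [] 12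
    let d2 := pvSlideA board r c player piece (-1) 0 (r - 1) c d1 12
    let d3 := pvSlideA board r c player piece 0 1 r (c + 1) d2 12
    pvSlideA board r c player piece 0 (-1) r (c - 1) d3 12

-- ===== PORT B =====
-- B's recursive slide: collect empty squares outward, stopping at the non-king
-- throne/corner restriction; inside Pre_ the recursion depth is ≤ 11, so fuel 12 suffices
def pvSlideB (board : List (List String)) (king : Bool) (dr dc : Int) : Int → Int → Nat → List (Int × Int)
  | _, _, 0 => []
  | nr, nc, fuel+1 =>
    if !(decide (0 ≤ nr ∧ nr < 11) && decide (0 ≤ nc ∧ nc < 11)) then []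
    else if pvCell board nr nc != "." then []
    else if !king && ((nr == 5 && nc == 5) || decide ((nr, nc) ∈ ([(0, 0), (0, 10), (10, 0), (10, 10)] : List (Int × Int)))) then []
    else (nr, nc) :: pvSlideB board king dr dc (nr + dr) (nc + dc) fuel

def get_piece_moves_alt (board : List (List String)) (r : Int) (c : Int) (player : String) : List (Int × Int) :=
  let piece := pvCell board r c
  let owns := if player == "A" then piece == "A" else piece == "D" || piece == "K"
  if !owns then []
  else
    let king := piece == "K"
    pvSlideB board king 1 0 (r + 1) c 12 ++ pvSlideB board king (-1) 0 (r - 1) c 12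
      ++ pvSlideB board king 0 1 r (c + 1) 12 ++ pvSlideB board king 0 (-1) r (c - 1) 12

-- ===== PRECONDITION & SPEC =====
-- board[r][c] as an Option (none = the initial lookup would raise IndexError)
def pvCellOpt (board : List (List String)) (r c : Int) : Option String :=
  (PySem.List.pyGet? board r).bind (fun row => PySem.List.pyGet? row c)

-- Pre_ = the initial board[r][c] lookup succeeds, and either the piece does not belong to the
-- player (A returns [] at once) or we are in the game's natural domain: a full 11×11 board
-- (BOARD_SIZE is hard-coded to 11) with in-range non-negative coordinates. Outside it A usually
-- raises IndexError while sliding; where it still returns (an owned piece on an undersized board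
-- whose slides are all immediately blocked, negative-index wraparound on a full board) the value
-- is an accident of Python list indexing.
def Pre_get_piece_moves (board : List (List String)) (r : Int) (c : Int) (player : String) : Prop :=
  (pvCellOpt board r c).isSome = true ∧
    (pvBelongsTo ((pvCellOpt board r c).getD "") player = false ∨
      (board.length = 11 ∧ (∀ row ∈ board, row.length = 11) ∧ 0 ≤ r ∧ r < 11 ∧ 0 ≤ c ∧ c < 11))

instance (board : List (List String)) (r : Int) (c : Int) (player : String) : Decidable (Pre_get_piece_moves board r c player) := by
  unfold Pre_get_piece_moves; infer_instance

def pvWitness_get_piece_moves : List (List String) × Int × Int × String :=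
  (List.replicate 11 (List.replicate 11 "."), 0, 0, "A")

def Spec_get_piece_moves (board : List (List String)) (r : Int) (c : Int) (player : String) (out : List (Int × Int)) : Prop := out = get_piece_moves_alt board r c player
instance (board : List (List String)) (r : Int) (c : Int) (player : String) (out : List (Int × Int)) : Decidable (Spec_get_piece_moves board r c player out) := by unfold Spec_get_piece_moves; infer_instance

-- ===== CLAIM (what is proved, stated in full; the proofs are below) =====
def Claim_equal_get_piece_moves : Prop := ∀ (board : List (List String)) (r : Int) (c : Int) (player : String), Dom_get_piece_moves board r c player → Pre_get_piece_moves board r c player → Spec_get_piece_moves board r c player (get_piece_moves board r c player)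

-- ===== LEMMAS AND PROOFS =====

lemma pvCell_eq (board : List (List String)) (r c : Int) :
    pvCell board r c = (pvCellOpt board r c).getD "" := by
  simp only [pvCell, pvCellOpt]
  cases h : PySem.List.pyGet? board r <;> simp

def pvDir (dr dc : Int) : Prop :=
  (dr = 1 ∧ dc = 0) ∨ (dr = -1 ∧ dc = 0) ∨ (dr = 0 ∧ dc = 1) ∨ (dr = 0 ∧ dc = -1)

lemma pathLoop_ok (board : List (List String)) (r c dr dc : Int) (hdir : pvDir dr dc)
    (k : Int)
    (hemp : ∀ j : Int, 1 ≤ j → j < k → pvCell board (r + j * dr) (c + j * dc) = ".") :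
    ∀ (fuel : Nat) (i : Int), 1 ≤ i → i ≤ k → k - i < (fuel : Int) →
      pvPathLoop board dr dc (r + k * dr) (c + k * dc) (r + i * dr) (c + i * dc) fuel = true := by
  intro fuel
  induction fuel with
  | zero => intro i h1 hik hf; omega
  | succ n ih =>
    intro i h1 hik hf
    by_cases hk : i = k
    · subst hk
      simp [pvPathLoop]
    · have hlt : i < k := lt_of_le_of_ne hik hk
      have hne : ¬((r + i * dr == r + k * dr) && (c + i * dc == c + k * dc)) = true := by
        rcases hdir with ⟨h1', h2'⟩ | ⟨h1', h2'⟩ | ⟨h1', h2'⟩ | ⟨h1', h2'⟩ <;> subst h1' <;> subst h2' <;>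
          simp <;> omega
      have hstep : r + i * dr + dr = r + (i + 1) * dr := by ring
      have hstep' : c + i * dc + dc = c + (i + 1) * dc := by ring
      have hcell := hemp i h1 hlt
      simp only [pvPathLoop, hne, hcell]
      simp only [bne_self_eq_false, Bool.false_eq_true, if_false]
      rw [hstep, hstep']
      exact ih (i + 1) (by omega) (by omega) (by omega)

lemma valid_move_eq (board : List (List String)) (r c : Int) (player : String)
    (hb : pvBelongsTo (pvCell board r c) player = true)
    (hr0 : 0 ≤ r) (hr1 : r < 11) (hc0 : 0 ≤ c) (hc1 : c < 11)
    (dr dc : Int) (hdir : pvDir dr dc) (k : Int) (hk : 1 ≤ k)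
    (hw : pvWithinBounds (r + k * dr) (c + k * dc) = true)
    (he : pvCell board (r + k * dr) (c + k * dc) = ".")
    (hemp : ∀ j : Int, 1 ≤ j → j < k → pvCell board (r + j * dr) (c + j * dc) = ".") :
    pv_is_valid_move board r c (r + k * dr) (c + k * dc) player
      = !((pvCell board r c != "K") && (pvIsThrone (r + k * dr) (c + k * dc) || pvIsCorner (r + k * dr) (c + k * dc))) := by
  have hwb : 0 ≤ r + k * dr ∧ r + k * dr < 11 ∧ 0 ≤ c + k * dc ∧ c + k * dc < 11 := by
    simp [pvWithinBounds] at hw; tauto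
  have hkle : k ≤ 10 := by
    rcases hdir with ⟨h1', h2'⟩ | ⟨h1', h2'⟩ | ⟨h1', h2'⟩ | ⟨h1', h2'⟩ <;> subst h1' <;> subst h2' <;>
      simp only [mul_one, mul_zero, add_zero, mul_neg] at hwb <;> omega
  have hpath : pvPathLoop board dr dc (r + k * dr) (c + k * dc) (r + 1 * dr) (c + 1 * dc) 24 = true :=
    pathLoop_ok board r c dr dc hdir k hemp 24 1 le_rfl hk (by omega)
  clear hwb hkle
  rcases hdir with ⟨hd1, hd2⟩ | ⟨hd1, hd2⟩ | ⟨hd1, hd2⟩ | ⟨hd1, hd2⟩ <;> subst hd1 <;> subst hd2 <;>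
    simp only [mul_one, mul_zero, add_zero, mul_neg, one_mul] at hpath hw he ⊢
  · have h1 : (r == r + k) = false := by simp; omega
    have h2 : (c == c) = true := by simp
    have h3 : r + k > r := by omega
    simp only [pv_is_valid_move, hb, Bool.not_true, Bool.false_eq_true, if_false, hw, h1, h2,
      bne, Bool.not_false, Bool.not_true, Bool.and_false, Bool.false_and, if_true, h3]
    simp only [he, bne_self_eq_false, Bool.false_eq_true, if_false, if_true, hpath, Bool.not_true]
    split <;> simp_all
    cases h : pvCell board r c == "K" <;> simp_all
  · have h1 : (r == r + -k) = false := by simp; omega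
    have h2 : (c == c) = true := by simp
    have h3 : ¬(r + -k > r) := by omega
    simp only [pv_is_valid_move, hb, Bool.not_true, Bool.false_eq_true, if_false, hw, h1, h2,
      bne, Bool.not_false, Bool.not_true, Bool.and_false, Bool.false_and, if_true, h3]
    simp only [he, bne_self_eq_false, Bool.false_eq_true, if_false, if_true, hpath, Bool.not_true]
    split <;> simp_all
    cases h : pvCell board r c == "K" <;> simp_all
  · have h1 : (r == r) = true := by simp
    have h2 : (c == c + k) = false := by simp; omega
    have h3 : c + k > c := by omega
    simp only [pv_is_valid_move, hb, Bool.not_true, Bool.false_eq_true, if_false, hw, h1, h2,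
      bne, Bool.not_false, Bool.not_true, Bool.and_false, Bool.false_and, if_true, h3]
    simp only [he, bne_self_eq_false, Bool.false_eq_true, if_false, if_true, hpath, Bool.not_true]
    split <;> simp_all
    cases h : pvCell board r c == "K" <;> simp_all
  · have h1 : (r == r) = true := by simp
    have h2 : (c == c + -k) = false := by simp; omega
    have h3 : ¬(c + -k > c) := by omega
    simp only [pv_is_valid_move, hb, Bool.not_true, Bool.false_eq_true, if_false, hw, h1, h2,
      bne, Bool.not_false, Bool.not_true, Bool.and_false, Bool.false_and, if_true, h3]
    simp only [he, bne_self_eq_false, Bool.false_eq_true, if_false, if_true, hpath, Bool.not_true]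
    split <;> simp_all
    cases h : pvCell board r c == "K" <;> simp_all

lemma slide_eq (board : List (List String)) (r c : Int) (player : String)
    (hb : pvBelongsTo (pvCell board r c) player = true)
    (hr0 : 0 ≤ r) (hr1 : r < 11) (hc0 : 0 ≤ c) (hc1 : c < 11)
    (dr dc : Int) (hdir : pvDir dr dc) :
    ∀ (fuel : Nat) (k : Int), 1 ≤ k →
      (∀ j : Int, 1 ≤ j → j < k → pvCell board (r + j * dr) (c + j * dc) = ".") →
      ∀ acc, pvSlideA board r c player (pvCell board r c) dr dc (r + k * dr) (c + k * dc) acc fuel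
        = acc ++ pvSlideB board (pvCell board r c == "K") dr dc (r + k * dr) (c + k * dc) fuel := by
  intro fuel
  induction fuel with
  | zero => intro k hk hemp acc; simp [pvSlideA, pvSlideB]
  | succ n ih =>
    intro k hk hemp acc
    by_cases hw : pvWithinBounds (r + k * dr) (c + k * dc) = true
    · by_cases he : pvCell board (r + k * dr) (c + k * dc) = "."
      · have hval := valid_move_eq board r c player hb hr0 hr1 hc0 hc1 dr dc hdir k hk hw he hemp
        have hwB : (decide (0 ≤ r + k * dr ∧ r + k * dr < 11) && decide (0 ≤ c + k * dc ∧ c + k * dc < 11)) = true := hw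
        have heB : (pvCell board (r + k * dr) (c + k * dc) != ".") = false := by simp [he]
        have hcond : (pvWithinBounds (r + k * dr) (c + k * dc) && (pvCell board (r + k * dr) (c + k * dc) == ".")) = true := by
          simp [hw, he]
        have hcornereq : (decide ((r + k * dr, c + k * dc) ∈ ([(0, 0), (0, 10), (10, 0), (10, 10)] : List (Int × Int)))) = pvIsCorner (r + k * dr) (c + k * dc) := rfl
        have hthrone : ((r + k * dr == 5) && (c + k * dc == 5)) = pvIsThrone (r + k * dr) (c + k * dc) := rfl
        simp only [pvSlideA, pvSlideB, hcond, hwB, heB, if_true, Bool.not_true, Bool.not_false,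
          Bool.false_eq_true, if_false, hval]
        rw [hcornereq, hthrone]
        by_cases hR : ((pvCell board r c != "K") && (pvIsThrone (r + k * dr) (c + k * dc) || pvIsCorner (r + k * dr) (c + k * dc))) = true
        · have hR' : (!(pvCell board r c == "K") && (pvIsThrone (r + k * dr) (c + k * dc) || pvIsCorner (r + k * dr) (c + k * dc))) = true := hR
          simp only [hR, hR', if_true, Bool.not_true, Bool.false_eq_true, if_false]
          simp
        · have hRf : ((pvCell board r c != "K") && (pvIsThrone (r + k * dr) (c + k * dc) || pvIsCorner (r + k * dr) (c + k * dc))) = false := by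
            simp only [Bool.not_eq_true] at hR; exact hR
          have hRf' : (!(pvCell board r c == "K") && (pvIsThrone (r + k * dr) (c + k * dc) || pvIsCorner (r + k * dr) (c + k * dc))) = false := hRf
          simp only [hRf, hRf', Bool.false_eq_true, if_false, Bool.not_false, if_true]
          have hstep : r + k * dr + dr = r + (k + 1) * dr := by ring
          have hstep' : c + k * dc + dc = c + (k + 1) * dc := by ring
          have hemp' : ∀ j : Int, 1 ≤ j → j < k + 1 → pvCell board (r + j * dr) (c + j * dc) = "." := by
            intro j hj1 hj2
            by_cases hjk : j = k
            · subst hjk; exact he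
            · exact hemp j hj1 (by omega)
          rw [hstep, hstep', ih (k + 1) (by omega) hemp' (acc ++ [(r + k * dr, c + k * dc)])]
          simp
      · have heB : (pvCell board (r + k * dr) (c + k * dc) != ".") = true := by simp [he]
        have hcond : (pvWithinBounds (r + k * dr) (c + k * dc) && (pvCell board (r + k * dr) (c + k * dc) == ".")) = false := by
          simp [he]
        have hwB : (decide (0 ≤ r + k * dr ∧ r + k * dr < 11) && decide (0 ≤ c + k * dc ∧ c + k * dc < 11)) = true := hw
        simp [pvSlideA, pvSlideB, hcond, hwB, heB]
    · have hwf : pvWithinBounds (r + k * dr) (c + k * dc) = false := by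
        simpa using hw
      have hwB : (decide (0 ≤ r + k * dr ∧ r + k * dr < 11) && decide (0 ≤ c + k * dc ∧ c + k * dc < 11)) = false := hwf
      have hcond : (pvWithinBounds (r + k * dr) (c + k * dc) && (pvCell board (r + k * dr) (c + k * dc) == ".")) = false := by
        simp [hwf]
      simp only [pvSlideA, pvSlideB, hcond, hwB, Bool.not_false, if_true, Bool.false_eq_true,
        if_false, List.append_nil]

-- ===== VERDICT (by name: the statement is the Claim_ definition above) =====
theorem get_piece_moves_spec : Claim_equal_get_piece_moves := by
  intro board r c player hdom hpre
  unfold Spec_get_piece_moves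
  obtain ⟨hsome, hdisj⟩ := hpre
  by_cases hb : pvBelongsTo (pvCell board r c) player = true
  · rcases hdisj with hnb | ⟨hlen, hrows, hr0, hr1, hc0, hc1⟩
    · rw [pvCell_eq] at hb
      simp [hnb] at hb
    · have hbB : (if player == "A" then pvCell board r c == "A" else (pvCell board r c == "D" || pvCell board r c == "K")) = true := hb
      have S1 := slide_eq board r c player hb hr0 hr1 hc0 hc1 1 0 (Or.inl ⟨rfl, rfl⟩) 12 1 le_rfl (by intro j h1 h2; omega)
      have S2 := slide_eq board r c player hb hr0 hr1 hc0 hc1 (-1) 0 (Or.inr (Or.inl ⟨rfl, rfl⟩)) 12 1 le_rfl (by intro j h1 h2; omega)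
      have S3 := slide_eq board r c player hb hr0 hr1 hc0 hc1 0 1 (Or.inr (Or.inr (Or.inl ⟨rfl, rfl⟩))) 12 1 le_rfl (by intro j h1 h2; omega)
      have S4 := slide_eq board r c player hb hr0 hr1 hc0 hc1 0 (-1) (Or.inr (Or.inr (Or.inr ⟨rfl, rfl⟩))) 12 1 le_rfl (by intro j h1 h2; omega)
      simp only [mul_one, mul_zero, add_zero, one_mul, ← sub_eq_add_neg] at S1 S2 S3 S4
      simp only [get_piece_moves, get_piece_moves_alt, hb, hbB, Bool.not_true, Bool.false_eq_true,
        if_false]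
      rw [S1, S2, S3, S4]
      simp
  · have hbf : pvBelongsTo (pvCell board r c) player = false := by simpa using hb
    have hbB : (if player == "A" then pvCell board r c == "A" else (pvCell board r c == "D" || pvCell board r c == "K")) = false := hbf
    simp only [get_piece_moves, get_piece_moves_alt, hbf, hbB, Bool.not_false, if_true]
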